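-- pv_equiv track=rewrite | github.com/SergioMarti97/algoritmos-prog-bioinformatica | PracticasAlgoritmos.py | find_right_permutations
-- ===== SOURCE A (Python) =====
-- def right_prefix(pi, original):
--     """
--     Devuelve el indice del primer elemento desordenado por la derecha
--     Devuelve -1 cuando la lista permutation esta ordenada
--     :param pi: la lista de elementos desordeados
--     :param original: la lista original de elementos
--     :return: el índice del primer elemento por la derecha ordenado
--     """
--     length = len(pi) - 1
--
--     while length >= 0 and pi[length] == original[length]:
--         length -= 1
--
--     return length
--
-- def do_permutation(pi, pos1, pos2):
--     """
--     Esta función realiza una permutacion de los elementos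
--     de la lista 'permutation' de los elementos entre la
--     posicion 'pos1' y la posición 'pos2'
--     Modifica el objeto 'permutation' pasado por parametro
--     :param pi: la lista de elementos
--     :param pos1: posición 1
--     :param pos2: posición 2
--     """
--     sub_list = pi[pos1:pos2 + 1]
--     sub_list.reverse()
--     for i in range(pos1, pos2 + 1):
--         pi[i] = sub_list[i - pos1]
--
-- def find_right_permutations(pi, identity):
--     """
--     Busqueda de derecha a izquierda las permutaciones de la
--     lista permuttion para obtener la lista identity
--     :param pi: la lista desordenada
--     :param identity: lista ordenada
--     :return: una lista de tuplas con las permutaciones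
--     """
--     right_permutations = []
--     while True:
--         tOrdInicial = right_prefix(pi, identity)
--
--         if tOrdInicial < 0:
--             break
--
--         i = tOrdInicial
--         for i in range(tOrdInicial, -1, -1):
--             if pi[i] == identity[tOrdInicial]:
--                 break
--
--         right_permutations.append((i, tOrdInicial))
--         do_permutation(pi, i, tOrdInicial)
--
--     return right_permutations
-- ===== SOURCE B (Python) =====
-- def find_right_permutations(pi, identity):
--     # Pancake-style reformulation: work on the REVERSED copy of pi, so the
--     # active position t is always the head; fixing t is a prefix flip that
--     # absorbs the pop of the matched head. Does not mutate pi (A does);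
--     # return values agree.
--     res = []
--     rev = pi[::-1]
--     for t in range(len(pi) - 1, -1, -1):
--         if rev[0] == identity[t]:
--             rev = rev[1:]
--         else:
--             k = rev.index(identity[t])
--             res.append((t - k, t))
--             rev = rev[:k][::-1] + rev[k + 1:]
--     return res
-- ===== Notes on version B (the rewrite author's own statement) =====
-- stated objective: alternative
-- what changed: Replaces A's while-True loop (full right_prefix rescan after every reversal, downward scan for the value, in-place middle-segment reversal via the element-writing helper do_permutation) by a pancake-style single pass over a reversed copy of pi: the active position is always the head, a first-occurrence index lookup replaces the downward scan, and fixing a position is one prefix flip that absorbs the pop of the matched head; B does not mutate pi (A does), return values agree.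
import Mathlib
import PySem

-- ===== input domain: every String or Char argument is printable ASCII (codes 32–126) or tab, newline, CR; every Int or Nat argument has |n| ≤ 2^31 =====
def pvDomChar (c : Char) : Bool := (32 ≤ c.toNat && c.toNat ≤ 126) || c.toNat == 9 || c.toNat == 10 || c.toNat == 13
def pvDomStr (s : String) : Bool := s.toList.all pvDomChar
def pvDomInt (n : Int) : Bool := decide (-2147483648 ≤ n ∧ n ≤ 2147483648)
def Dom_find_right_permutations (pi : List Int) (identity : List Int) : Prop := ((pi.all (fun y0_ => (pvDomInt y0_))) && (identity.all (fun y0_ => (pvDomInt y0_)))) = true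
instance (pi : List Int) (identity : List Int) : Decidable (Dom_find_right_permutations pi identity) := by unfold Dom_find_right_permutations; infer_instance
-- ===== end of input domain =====

-- B replaces A's while-True loop (right_prefix rescan + downward value scan + in-place
-- middle-segment reversal via do_permutation) by a pancake-style single pass over a
-- reversed copy of pi: the active position is always the head, and fixing it is one
-- prefix flip that absorbs the pop of the matched head. A mutates its argument pi in
-- place, B does not; the equivalence proved here is about the return value.

-- ===== PORT A =====
-- while-loop of right_prefix; the Nat argument k stands for length+1 (k = 0 ↔ length = -1)
def rpGo (pi original : List Int) : Nat → Int
  | 0 => -1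
  | k+1 =>
    if PySem.List.pyGet? pi (k : Int) = PySem.List.pyGet? original (k : Int) then
      rpGo pi original k
    else (k : Int)

def right_prefix (pi original : List Int) : Int := rpGo pi original pi.length

def do_permutation (pi : List Int) (pos1 pos2 : Int) : List Int :=
  let sub := (PySem.List.slice pi (some pos1) (some (pos2 + 1))).reverse
  (PySem.List.pyRange pos1 (pos2 + 1) 1).foldl
    (fun acc i => PySem.List.pySetD acc i (PySem.List.pyGetD sub (i - pos1) 0)) pi

-- 'for i in range(tOrdInicial, -1, -1): if pi[i] == identity[tOrdInicial]: break';
-- the Nat argument k stands for i+1, the base case is the loop falling through with i = 0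
def scanGo (pi identity : List Int) (t : Int) : Nat → Int
  | 0 => 0
  | k+1 =>
    if PySem.List.pyGet? pi (k : Int) = PySem.List.pyGet? identity t then (k : Int)
    else scanGo pi identity t k

-- the while-True loop; fuel pi.length + 1 suffices on Pre_: every reversal fixes the
-- rightmost mismatch, which strictly decreases (that is what the lemmas below prove)
def frpGo (identity : List Int) : Nat → List Int → List (Int × Int) → List (Int × Int)
  | 0, _, acc => acc
  | fuel+1, pi, acc =>
    let t := right_prefix pi identity
    if t < 0 then acc
    else
      let i := scanGo pi identity t (t.toNat + 1)
      frpGo identity fuel (do_permutation pi i t) (acc ++ [(i, t)])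

def find_right_permutations (pi : List Int) (identity : List Int) : List (Int × Int) :=
  frpGo identity (pi.length + 1) pi []

-- ===== PORT B =====
-- loop body of B's single for-pass over the reversed list; st = (rev, res)
def bStep (identity : List Int) (st : List Int × List (Int × Int)) (t : Int) :
    List Int × List (Int × Int) :=
  if PySem.List.pyGet? st.1 0 = PySem.List.pyGet? identity t then
    (PySem.List.slice st.1 (some 1) none, st.2)
  else
    let k : Nat := (PySem.List.index? st.1 (PySem.List.pyGetD identity t 0)).getD 0
    ((PySem.List.slice? (PySem.List.slice st.1 none (some (k:Int))) none none (-1)).getD []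
       ++ PySem.List.slice st.1 (some ((k:Int) + 1)) none,
     st.2 ++ [(t - (k:Int), t)])

def find_right_permutations_alt (pi : List Int) (identity : List Int) : List (Int × Int) :=
  ((PySem.List.pyRange ((pi.length : Int) - 1) (-1) (-1)).foldl (bStep identity)
    ((PySem.List.slice? pi none none (-1)).getD [], [])).2

-- ===== PRECONDITION & SPEC =====
-- Pre_ excludes exactly the inputs on which the Python A does not return: identity shorter than pi
-- raises IndexError in right_prefix — e.g. ([1], []), ([1, 2], [3]), ([1, 2, 3], [1, 2]), ([5, 6], []), ([7, 8, 9], [7]), ([2, 2], [2]), ([9], []), ([3, 4], [5]) —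
-- and pi not a rearrangement of the first len(pi) elements of identity makes the while-True loop run forever (a needed value is missing).
def Pre_find_right_permutations (pi : List Int) (identity : List Int) : Prop :=
  pi.length ≤ identity.length ∧ pi.Perm (identity.take pi.length)
instance (pi : List Int) (identity : List Int) : Decidable (Pre_find_right_permutations pi identity) := by
  unfold Pre_find_right_permutations; infer_instance

def pvWitness_find_right_permutations : List Int × List Int := ([], [])

def Spec_find_right_permutations (pi : List Int) (identity : List Int) (out : List (Int × Int)) : Prop := out = find_right_permutations_alt pi identity
instance (pi : List Int) (identity : List Int) (out : List (Int × Int)) : Decidable (Spec_find_right_permutations pi identity out) := by unfold Spec_find_right_permutations; infer_instance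

-- ===== CLAIM (what is proved, stated in full; the proofs are below) =====
def Claim_equal_find_right_permutations : Prop := ∀ (pi : List Int) (identity : List Int), Dom_find_right_permutations pi identity → Pre_find_right_permutations pi identity → Spec_find_right_permutations pi identity (find_right_permutations pi identity)

-- ===== LEMMAS AND PROOFS =====

def spl (p : List Int) (i k : Nat) : List Int :=
  p.take i ++ ((p.drop i).take (k+1-i)).reverse ++ p.drop (k+1)

theorem length_spl (p : List Int) (i k : Nat) (hi : i ≤ k) (hk : k < p.length) :
    (spl p i k).length = p.length := by
  simp [spl]; omega

theorem spl_perm (p : List Int) (i k : Nat) (hi : i ≤ k) : (spl p i k).Perm p := by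
  have h2 : (p.drop i).drop (k+1-i) = p.drop (k+1) := by rw [List.drop_drop]; congr 1; omega
  have h1 : p.take i ++ ((p.drop i).take (k+1-i) ++ p.drop (k+1)) = p := by
    rw [← h2, List.take_append_drop, List.take_append_drop]
  conv_rhs => rw [← h1]
  unfold spl
  rw [List.append_assoc]
  exact List.Perm.append_left _ (List.Perm.append_right _ (List.reverse_perm _))

theorem spl_getElem_high (p : List Int) (i k j : Nat) (hi : i ≤ k) (hk : k < p.length)
    (hj : k + 1 ≤ j) (hjl : j < p.length) :
    (spl p i k)[j]'(by rw [length_spl p i k hi hk]; exact hjl) = p[j] := by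
  unfold spl
  have hlen : (p.take i ++ ((p.drop i).take (k+1-i)).reverse).length = k + 1 := by simp; omega
  rw [List.getElem_append_right (by rw [hlen]; omega)]
  simp only [hlen]
  rw [List.getElem_drop]
  congr 1; omega

theorem spl_getElem_k (p : List Int) (i k : Nat) (hi : i ≤ k) (hk : k < p.length) :
    (spl p i k)[k]'(by rw [length_spl p i k hi hk]; exact hk) = p[i]'(by omega) := by
  unfold spl
  have hA : (p.take i).length = i := by simp; omega
  have hB : (((p.drop i).take (k+1-i)).reverse).length = k + 1 - i := by simp; omega
  rw [List.getElem_append_left (by simp [hA, hB]; omega),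
      List.getElem_append_right (by rw [hA]; omega)]
  rw [List.getElem_reverse, List.getElem_take, List.getElem_drop]
  congr 1
  simp only [hA, List.length_take, List.length_drop]
  omega

theorem write_loop (sub : List Int) : ∀ (p : List Int) (a : Nat), a + sub.length ≤ p.length →
    (PySem.List.pyRange (a:Int) ((a:Int)+(sub.length:Int)) 1).foldl
      (fun acc i => PySem.List.pySetD acc i (PySem.List.pyGetD sub (i - (a:Int)) 0)) p
    = p.take a ++ sub ++ p.drop (a + sub.length) := by
  induction sub with
  | nil =>
    intro p a h
    simp [PySem.List.pyRange_one_eq_nil]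
  | cons x s ih =>
    intro p a h
    rw [PySem.List.pyRange_one_cons (by push_cast [List.length_cons]; omega)]
    simp only [List.foldl_cons]
    have hstep : PySem.List.pySetD p (a:Int) (PySem.List.pyGetD (x :: s) ((a:Int) - (a:Int)) 0)
        = p.set a x := by simp
    rw [hstep]
    have hrange : (a:Int) + ((x :: s).length : Int) = ((a+1 : Nat):Int) + (s.length : Int) := by
      push_cast [List.length_cons]; omega
    have hup : (a:Int) + 1 = ((a+1 : Nat):Int) := by push_cast; omega
    rw [hrange, hup]
    rw [PySem.List.foldl_congr_mem _ _
      (fun acc i => PySem.List.pySetD acc i (PySem.List.pyGetD s (i - ((a+1:Nat):Int)) 0)) _ ?hfg]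
    case hfg =>
      intro acc i hi
      rw [PySem.List.mem_pyRange_one] at hi
      obtain ⟨d, hd⟩ : ∃ d : Nat, i - ((a+1:Nat):Int) = (d:Int) :=
        ⟨(i - ((a+1:Nat):Int)).toNat, by push_cast at hi ⊢; omega⟩
      have h1 : i - (a:Int) = ((d+1:Nat):Int) := by push_cast at hd ⊢; omega
      congr 1
      rw [h1, hd, PySem.List.pyGetD_natCast, PySem.List.pyGetD_natCast]
      simp
    rw [ih (p.set a x) (a+1) (by simp; omega)]
    have h1 : (p.set a x).take (a+1) = p.take a ++ [x] := by
      rw [List.set_eq_take_append_cons_drop, if_pos (by omega)]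
      have hl : (p.take a).length = a := by simp; omega
      rw [List.take_append, hl, Nat.add_sub_cancel_left, List.take_take,
          Nat.min_eq_right (by omega)]
      simp
    have h2 : (p.set a x).drop (a+1+s.length) = p.drop (a+(x::s).length) := by
      rw [List.drop_set_of_lt (by omega)]
      congr 1; simp; omega
    rw [h1, h2]
    simp

theorem scan_eq (p identity : List Int) (tI : Int) (v : Int)
    (hv : PySem.List.pyGet? identity tI = some v) :
    ∀ m : Nat, m ≤ p.length → v ∈ p.take m →
    scanGo p identity tI m
      = (m:Int) - 1 - (((PySem.List.index? ((p.take m).reverse) v).getD 0 : Nat) : Int) := by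
  intro m
  induction m with
  | zero => intro _ hm; simp at hm
  | succ m ih =>
    intro hm hmem
    have hml : m < p.length := by omega
    have htake : p.take (m+1) = p.take m ++ [p[m]] := by
      rw [List.take_add_one]
      simp [List.getElem?_eq_getElem hml]
    rw [scanGo, PySem.List.pyGet?_natCast, List.getElem?_eq_getElem hml, hv, htake]
    by_cases hx : p[m] = v
    · rw [if_pos (by rw [hx])]
      rw [List.reverse_append, List.reverse_singleton, List.singleton_append, hx,
          PySem.List.index?_cons_self]
      simp
    · rw [if_neg (by simpa using hx)]
      have hmem' : v ∈ p.take m := by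
        rcases List.mem_append.mp (htake ▸ hmem) with h | h
        · exact h
        · simp at h; exact absurd h.symm hx
      rw [ih (by omega) hmem']
      rw [List.reverse_append]
      simp only [List.reverse_singleton, List.singleton_append]
      rw [PySem.List.index?_cons_of_ne _ hx]
      have hsome := (PySem.List.index?_isSome_iff ((p.take m).reverse) v).mpr
        (by simpa using hmem')
      obtain ⟨d, hd⟩ := Option.isSome_iff_exists.mp hsome
      rw [hd]
      simp
      omega

theorem do_perm_eq (p : List Int) (iN k : Nat) (hi : iN ≤ k) (hk : k < p.length) :
    do_permutation p (iN:Int) (k:Int) = spl p iN k := by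
  unfold do_permutation
  have hc : (k:Int) + 1 = ((k+1:Nat):Int) := by push_cast; omega
  rw [hc, PySem.List.slice_natCast]
  have hlen : (((p.drop iN).take (k+1-iN)).reverse).length = k+1-iN := by simp; omega
  have hr : ((k+1:Nat):Int) = (iN:Int) + ((((p.drop iN).take (k+1-iN)).reverse).length : Int) := by
    rw [hlen]; push_cast; omega
  rw [hr, write_loop _ p iN (by rw [hlen]; omega)]
  rw [hlen]
  unfold spl
  have : iN + (k+1-iN) = k+1 := by omega
  rw [this]

theorem rpGo_skip (p identity : List Int) : ∀ m k : Nat, k ≤ m →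
    (∀ j : Nat, k ≤ j → j < m → PySem.List.pyGet? p (j:Int) = PySem.List.pyGet? identity (j:Int)) →
    rpGo p identity m = rpGo p identity k := by
  intro m
  induction m with
  | zero => intro k h _; rw [Nat.le_zero.mp h]
  | succ m ih =>
    intro k h hmatch
    by_cases hkm : k = m+1
    · rw [hkm]
    · rw [rpGo, if_pos (hmatch m (by omega) (by omega))]
      exact ih k (by omega) (fun j h1 h2 => hmatch j h1 (by omega))

-- head and tail of the reversed working prefix
theorem rev_take_cons (p : List Int) (k : Nat) (hk : k < p.length) :
    (p.take (k+1)).reverse = p[k] :: (p.take k).reverse := by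
  rw [List.take_add_one]
  simp [List.getElem?_eq_getElem hk]

-- the flipped-prefix state after one pancake step is exactly what A's reversal leaves below k
theorem newrev (p : List Int) (d k : Nat) (hd : d ≤ k) (hk : k < p.length) :
    (((p.take (k+1)).reverse).take d).reverse ++ ((p.take (k+1)).reverse).drop (d+1)
      = ((spl p (k-d) k).take k).reverse := by
  set q := p.take (k+1) with hq
  have hql : q.length = k+1 := by
    rw [hq, List.length_take]; omega
  set i := k - d with hi
  have hRtake : q.reverse.take d = (q.drop (i+1)).reverse := by
    have h := List.reverse_drop (l := q) (i := i+1)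
    rw [hql, show k + 1 - (i+1) = d from by omega] at h
    exact h.symm
  have hRdrop : q.reverse.drop (d+1) = (q.take i).reverse := by
    have h := List.reverse_take (l := q) (i := i)
    rw [hql, show k + 1 - i = d + 1 from by omega] at h
    exact h.symm
  have hqd : (p.drop i).take (k+1-i) = q.drop i := by
    rw [hq, List.drop_take]
  have hsplq : spl p i k = q.take i ++ (q.drop i).reverse ++ p.drop (k+1) := by
    unfold spl
    rw [hqd, hq, List.take_take, Nat.min_eq_left (by omega)]
  have hlen2 : (q.take i ++ (q.drop i).reverse).length = k+1 := by
    rw [List.length_append, List.length_take, List.length_reverse, List.length_drop, hql]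
    omega
  have hti : (q.take i).length = i := by
    rw [List.length_take, hql]; omega
  have htk : (spl p i k).take k = q.take i ++ ((q.drop i).reverse).take d := by
    rw [hsplq, List.take_append (l₁ := q.take i ++ (q.drop i).reverse), hlen2,
        show k - (k+1) = 0 from by omega, List.take_zero, List.append_nil,
        List.take_append (l₁ := q.take i), hti,
        List.take_of_length_le (show (q.take i).length ≤ k from by rw [hti]; omega),
        show k - i = d from by omega]
  have hdd : (q.drop i).drop 1 = q.drop (i+1) := by
    rw [List.drop_drop]
  have hflip : ((q.drop i).reverse).take d = (q.drop (i+1)).reverse := by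
    have h := List.reverse_drop (l := q.drop i) (i := 1)
    rw [hdd, List.length_drop, hql, show k + 1 - i - 1 = d from by omega] at h
    exact h.symm
  rw [hRtake, hRdrop, htk, hflip, List.reverse_append, List.reverse_reverse]

theorem bStep_skip (identity : List Int) (st : List Int × List (Int × Int)) (t : Int)
    (h : PySem.List.pyGet? st.1 0 = PySem.List.pyGet? identity t) :
    bStep identity st t = (PySem.List.slice st.1 (some 1) none, st.2) := by
  simp [bStep, h]

theorem bRes (identity : List Int) : ∀ (ts : List Int) (p : List Int) (res : List (Int × Int)),
    List.foldl (bStep identity) (p, res) ts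
      = ((List.foldl (bStep identity) (p, []) ts).1,
         res ++ (List.foldl (bStep identity) (p, []) ts).2) := by
  intro ts
  induction ts with
  | nil => intro p res; simp
  | cons t ts ih =>
    intro p res
    have hstep : ∀ res' : List (Int × Int), bStep identity (p, res') t
        = ((bStep identity (p, []) t).1, res' ++ (bStep identity (p, []) t).2) := by
      intro res'
      unfold bStep
      by_cases h : PySem.List.pyGet? p 0 = PySem.List.pyGet? identity t
      · simp [h]
      · simp [h]
    rw [List.foldl_cons, List.foldl_cons, hstep res,
        ih (bStep identity (p, []) t).1 (res ++ (bStep identity (p, []) t).2)]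
    conv_rhs => rw [← Prod.mk.eta (p := bStep identity (p, []) t),
                    ih (bStep identity (p, []) t).1 (bStep identity (p, []) t).2]
    simp

theorem main_loop (identity : List Int) : ∀ k : Nat, ∀ (p : List Int) (acc : List (Int × Int)) (fuel : Nat),
    k < fuel → k ≤ p.length → p.length ≤ identity.length →
    (∀ j : Nat, k ≤ j → j < p.length → PySem.List.pyGet? p (j:Int) = PySem.List.pyGet? identity (j:Int)) →
    p.Perm (identity.take p.length) →
    frpGo identity fuel p acc
      = acc ++ (List.foldl (bStep identity) ((p.take k).reverse, [])
          (PySem.List.pyRange ((k:Int)-1) (-1) (-1))).2 := by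
  intro k
  induction k with
  | zero =>
    intro p acc fuel hfuel _ hlen hmatch _
    obtain ⟨f, rfl⟩ : ∃ f, fuel = f+1 := ⟨fuel-1, by omega⟩
    have ht : right_prefix p identity = -1 := by
      unfold right_prefix
      rw [rpGo_skip p identity p.length 0 (by omega) (fun j h1 h2 => hmatch j (by omega) h2)]
      rfl
    simp only [frpGo]
    rw [ht, if_pos (by norm_num)]
    rw [show ((0:Nat):Int) - 1 = (-1:Int) from by norm_num,
        PySem.List.pyRange_neg_one_eq_nil (by norm_num)]
    simp
  | succ k ih =>
    intro p acc fuel hfuel hk hlen hmatch hperm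
    obtain ⟨f, rfl⟩ : ∃ f, fuel = f+1 := ⟨fuel-1, by omega⟩
    have hkl : k < p.length := by omega
    have hkid : k < identity.length := by omega
    have e1 : ((k+1:Nat):Int) - 1 = (k:Int) := by push_cast; omega
    have hhead : PySem.List.pyGet? ((p.take (k+1)).reverse) 0 = some (p[k]'hkl) := by
      rw [rev_take_cons p k hkl,
          show (0:Int) = ((0:Nat):Int) from rfl, PySem.List.pyGet?_natCast]
      rfl
    have hpk : PySem.List.pyGet? p (k:Int) = some (p[k]'hkl) := by
      rw [PySem.List.pyGet?_natCast, List.getElem?_eq_getElem hkl]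
    have hik : PySem.List.pyGet? identity (k:Int) = some (identity[k]'hkid) := by
      rw [PySem.List.pyGet?_natCast, List.getElem?_eq_getElem hkid]
    by_cases hmk : PySem.List.pyGet? p (k:Int) = PySem.List.pyGet? identity (k:Int)
    · have hmatch' : ∀ j : Nat, k ≤ j → j < p.length →
          PySem.List.pyGet? p (j:Int) = PySem.List.pyGet? identity (j:Int) := by
        intro j hj hjl
        rcases Nat.eq_or_lt_of_le hj with h | h
        · rw [← h]; exact hmk
        · exact hmatch j h hjl
      have hcond : PySem.List.pyGet? ((p.take (k+1)).reverse) 0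
          = PySem.List.pyGet? identity (k:Int) := by rw [hhead, ← hpk, hmk]
      have htail : PySem.List.slice ((p.take (k+1)).reverse) (some 1) none
          = (p.take k).reverse := by
        rw [show (1:Int) = ((1:Nat):Int) from rfl, PySem.List.slice_from_natCast,
            rev_take_cons p k hkl]
        rfl
      rw [e1, PySem.List.pyRange_neg_one_cons (by omega), List.foldl_cons,
          bStep_skip identity _ (k:Int) hcond]
      simp only [htail]
      exact ih p acc (f+1) (by omega) (by omega) hlen hmatch' hperm
    · -- mismatch at position k: one reversal happens on both sides
      have ht : right_prefix p identity = (k:Int) := by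
        unfold right_prefix
        rw [rpGo_skip p identity p.length (k+1) (by omega) (fun j h1 h2 => hmatch j h1 h2)]
        rw [rpGo, if_neg hmk]
      have hvsome : PySem.List.pyGet? identity (k:Int) = some (identity[k]'hkid) := hik
      have hdropeq : p.drop (k+1) = (identity.take p.length).drop (k+1) := by
        apply List.ext_getElem
        · simp; omega
        · intro j h1 h2
          rw [List.getElem_drop, List.getElem_drop, List.getElem_take]
          have := hmatch (k+1+j) (by omega) (by simp at h1; omega)
          rw [PySem.List.pyGet?_natCast, PySem.List.pyGet?_natCast,
              List.getElem?_eq_getElem (by simp at h1; omega : k+1+j < p.length),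
              List.getElem?_eq_getElem (by simp at h1 ⊢; omega : k+1+j < identity.length)] at this
          exact Option.some.inj this
      have h3 : (identity.take p.length).take (k+1) = identity.take (k+1) := by
        rw [List.take_take]; congr 1; omega
      have hpre : (p.take (k+1)).Perm (identity.take (k+1)) := by
        have key : (p.take (k+1) ++ p.drop (k+1)).Perm (identity.take (k+1) ++ p.drop (k+1)) := by
          rw [List.take_append_drop]
          conv_rhs => rw [hdropeq, ← h3, List.take_append_drop]
          exact hperm
        exact (List.perm_append_right_iff _).mp key
      have hvmem : identity[k]'hkid ∈ p.take (k+1) := by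
        have hg : (identity.take (k+1))[k]'(by simp; omega) = identity[k]'hkid := by
          rw [List.getElem_take]
        exact hpre.mem_iff.mpr (hg ▸ List.getElem_mem _)
      have hsome := (PySem.List.index?_isSome_iff ((p.take (k+1)).reverse) (identity[k]'hkid)).mpr
        (by simpa using hvmem)
      obtain ⟨d, hd⟩ := Option.isSome_iff_exists.mp hsome
      obtain ⟨hdlt, hdv, -⟩ := PySem.List.getElem_of_index?_eq_some hd
      have hdlen : d < k+1 := by simp at hdlt; omega
      have hpkd : p[k-d]'(by omega) = identity[k]'hkid := by
        rw [List.getElem_reverse] at hdv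
        rw [List.getElem_take] at hdv
        convert hdv using 2
        simp
        omega
      have hscan : scanGo p identity (k:Int) (k+1) = (k:Int) - (d:Int) := by
        rw [scan_eq p identity _ _ hvsome (k+1) (by omega) hvmem, hd]
        simp
      have hi : (k:Int) - (d:Int) = ((k-d:Nat):Int) := by omega
      have hbstep : bStep identity ((p.take (k+1)).reverse, []) (k:Int)
          = (((spl p (k-d) k).take k).reverse, [(((k-d:Nat):Int), (k:Int))]) := by
        unfold bStep
        rw [if_neg (by
          rw [hhead, hik]
          exact fun hcc => hmk (by rw [hpk, hik]; exact hcc))]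
        simp only
        rw [PySem.List.pyGetD_natCast, List.getD_eq_getElem identity 0 hkid, hd, Option.getD_some]
        rw [PySem.List.slice_to_natCast,
            show (d:Int) + 1 = ((d+1:Nat):Int) from by push_cast; omega,
            PySem.List.slice_from_natCast, PySem.List.slice?_none_none_neg_one, Option.getD_some]
        rw [newrev p d k (by omega) hkl, ← hi, List.nil_append]
      -- A side
      simp only [frpGo]
      rw [ht, if_neg (by omega)]
      simp only [Int.toNat_natCast]
      rw [hscan, hi, do_perm_eq p (k-d) k (by omega) hkl]
      -- B side
      rw [e1, PySem.List.pyRange_neg_one_cons (by omega), List.foldl_cons, hbstep]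
      rw [bRes identity _ (((spl p (k-d) k).take k).reverse) [(((k-d:Nat):Int), (k:Int))]]
      -- invariants for the new state
      have hlen' : (spl p (k-d) k).length = p.length := length_spl p (k-d) k (by omega) hkl
      have hmatch' : ∀ j : Nat, k ≤ j → j < (spl p (k-d) k).length →
          PySem.List.pyGet? (spl p (k-d) k) (j:Int) = PySem.List.pyGet? identity (j:Int) := by
        intro j hj hjl
        rw [hlen'] at hjl
        rw [PySem.List.pyGet?_natCast, PySem.List.pyGet?_natCast,
            List.getElem?_eq_getElem (by rw [hlen']; exact hjl),
            List.getElem?_eq_getElem (by omega : j < identity.length)]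
        rcases Nat.eq_or_lt_of_le hj with h | h
        · subst h
          rw [spl_getElem_k p (k-d) k (by omega) hkl, hpkd]
        · rw [spl_getElem_high p (k-d) k j (by omega) hkl (by omega) hjl]
          have := hmatch j (by omega) hjl
          rw [PySem.List.pyGet?_natCast, PySem.List.pyGet?_natCast,
              List.getElem?_eq_getElem hjl,
              List.getElem?_eq_getElem (by omega : j < identity.length)] at this
          rw [Option.some.inj this]
      have hperm' : (spl p (k-d) k).Perm (identity.take (spl p (k-d) k).length) := by
        rw [hlen']
        exact (spl_perm p (k-d) k (by omega)).trans hperm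
      rw [ih (spl p (k-d) k) (acc ++ [(((k-d:Nat):Int), (k:Int))]) f (by omega)
          (by rw [hlen']; omega) (by rw [hlen']; exact hlen) hmatch' hperm']
      simp

-- ===== VERDICT (by name: the statement is the Claim_ definition above) =====
theorem find_right_permutations_spec : Claim_equal_find_right_permutations := by
  intro pi identity _ hpre
  unfold Spec_find_right_permutations find_right_permutations find_right_permutations_alt
  rw [PySem.List.slice?_none_none_neg_one, Option.getD_some,
      show pi.reverse = (pi.take pi.length).reverse from by rw [List.take_length]]
  rw [main_loop identity pi.length pi [] (pi.length+1) (by omega) (le_refl _) hpre.1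
      (fun j hj hjl => absurd hjl (by omega)) hpre.2]
  simp
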